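-- pv_equiv track=rewrite | github.com/ohmema/interview | python/interviews/Array/signalFX.py | threshholdFilterWithDuration
-- ===== SOURCE A (Python) =====
-- def threshholdFilterWithDuration(cpu_usage_values, threshold, du_t):
--     rv = []
--     start_duration = cpu_usage_values[0]
--     for t in cpu_usage_values:
--         if (t[0] - start_duration[0]) > du_t and t[1] >= threshold:
--             rv.append(t)
--         elif (t[0] - start_duration[0]) <= du_t and t[1] >= threshold:
--             pass
--         elif t[1] < threshold:
--             start_duration = t
--     return rv
-- ===== SOURCE B (Python) =====
-- def threshholdFilterWithDuration(cpu_usage_values, threshold, du_t):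
--     # Pass 1: per-element reference time = time of the most recent below-threshold sample.
--     ref = cpu_usage_values[0][0]
--     refs = []
--     for t in cpu_usage_values:
--         if t[1] < threshold:
--             ref = t[0]
--         refs.append(ref)
--     # Pass 2: keep above-threshold samples sustained longer than du_t past their reference.
--     return [t for t, r in zip(cpu_usage_values, refs)
--             if t[1] >= threshold and t[0] - r > du_t]
-- ===== Notes on version B (the rewrite author's own statement) =====
-- stated objective: alternative
-- what changed: Replaces A's single stateful three-branch loop by a two-pass decomposition: first build a per-element list of reference times (last below-threshold time), then a zip-and-filter comprehension selects the output.
import Mathlib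
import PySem

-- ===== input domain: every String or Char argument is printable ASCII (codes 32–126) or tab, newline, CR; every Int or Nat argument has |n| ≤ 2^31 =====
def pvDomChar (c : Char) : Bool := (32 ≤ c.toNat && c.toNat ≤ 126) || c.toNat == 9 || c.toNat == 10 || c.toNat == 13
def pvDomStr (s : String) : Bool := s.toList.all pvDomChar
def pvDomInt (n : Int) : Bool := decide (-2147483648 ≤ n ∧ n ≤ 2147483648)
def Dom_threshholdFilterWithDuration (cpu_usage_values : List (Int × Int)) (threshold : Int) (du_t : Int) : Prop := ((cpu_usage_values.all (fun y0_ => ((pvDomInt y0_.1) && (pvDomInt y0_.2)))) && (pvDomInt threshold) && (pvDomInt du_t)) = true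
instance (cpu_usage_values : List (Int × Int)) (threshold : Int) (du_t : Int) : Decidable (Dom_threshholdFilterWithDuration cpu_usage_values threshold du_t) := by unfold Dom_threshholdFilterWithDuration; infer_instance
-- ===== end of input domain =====

-- B replaces A's single stateful three-branch loop by two passes (reference-time list, then zip-filter); same cost, alternative decomposition.
-- Pre_ excludes only the empty list, on which both Pythons raise IndexError.


-- ===== PORT A =====
-- literal transliteration of A: one foldl carrying (rv, start_duration), branches in source order
def threshholdFilterWithDuration (cpu_usage_values : List (Int × Int)) (threshold : Int) (du_t : Int) : List (Int × Int) :=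
  match cpu_usage_values.head? with
  | none => []   -- Python raises IndexError here (excluded by Pre_)
  | some sd0 =>
    (cpu_usage_values.foldl
      (fun (st : List (Int × Int) × (Int × Int)) t =>
        if t.1 - st.2.1 > du_t ∧ t.2 ≥ threshold then (st.1 ++ [t], st.2)
        else if t.1 - st.2.1 ≤ du_t ∧ t.2 ≥ threshold then st
        else if t.2 < threshold then (st.1, t)
        else st)
      ([], sd0)).1

-- ===== PORT B =====
-- pass 1: per-element reference time (time of the most recent below-threshold sample)
def pvAltRefs (threshold : Int) : List (Int × Int) → Int → List Int
  | [], _ => []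
  | t :: ts, r =>
    let r' := if t.2 < threshold then t.1 else r
    r' :: pvAltRefs threshold ts r'

def threshholdFilterWithDuration_alt (cpu_usage_values : List (Int × Int)) (threshold : Int) (du_t : Int) : List (Int × Int) :=
  match cpu_usage_values.head? with
  | none => []   -- Python raises IndexError here (excluded by Pre_)
  | some h =>
    ((cpu_usage_values.zip (pvAltRefs threshold cpu_usage_values h.1)).filter
      (fun p => decide (p.1.2 ≥ threshold) && decide (p.1.1 - p.2 > du_t))).map (·.1)

-- ===== PRECONDITION & SPEC =====
-- Pre_ excludes exactly the empty list: both A and B index cpu_usage_values[0] and raise IndexError there.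
def Pre_threshholdFilterWithDuration (cpu_usage_values : List (Int × Int)) (_threshold : Int) (_du_t : Int) : Prop := cpu_usage_values ≠ []
instance (cpu_usage_values : List (Int × Int)) (threshold : Int) (du_t : Int) : Decidable (Pre_threshholdFilterWithDuration cpu_usage_values threshold du_t) := by unfold Pre_threshholdFilterWithDuration; infer_instance
def pvWitness_threshholdFilterWithDuration : (List (Int × Int)) × Int × Int := ([(0, 5), (3, 1), (10, 7)], 4, 2)

def Spec_threshholdFilterWithDuration (cpu_usage_values : List (Int × Int)) (threshold : Int) (du_t : Int) (out : List (Int × Int)) : Prop := out = threshholdFilterWithDuration_alt cpu_usage_values threshold du_t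
instance (cpu_usage_values : List (Int × Int)) (threshold : Int) (du_t : Int) (out : List (Int × Int)) : Decidable (Spec_threshholdFilterWithDuration cpu_usage_values threshold du_t out) := by unfold Spec_threshholdFilterWithDuration; infer_instance

-- ===== CLAIM (what is proved, stated in full; the proofs are below) =====
def Claim_equal_threshholdFilterWithDuration : Prop := ∀ (cpu_usage_values : List (Int × Int)) (threshold : Int) (du_t : Int), Dom_threshholdFilterWithDuration cpu_usage_values threshold du_t → Pre_threshholdFilterWithDuration cpu_usage_values threshold du_t → Spec_threshholdFilterWithDuration cpu_usage_values threshold du_t (threshholdFilterWithDuration cpu_usage_values threshold du_t)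

-- ===== LEMMAS AND PROOFS =====

-- common recursive characterisation of what both loops compute, given a reference time r
def pvGo (threshold du_t : Int) : List (Int × Int) → Int → List (Int × Int)
  | [], _ => []
  | t :: ts, r =>
    if t.2 < threshold then pvGo threshold du_t ts t.1
    else if t.1 - r > du_t then t :: pvGo threshold du_t ts r
    else pvGo threshold du_t ts r

theorem pvA_go (threshold du_t : Int) (xs : List (Int × Int)) :
    ∀ (acc : List (Int × Int)) (r : Int × Int),
    (xs.foldl
      (fun (st : List (Int × Int) × (Int × Int)) t =>
        if t.1 - st.2.1 > du_t ∧ t.2 ≥ threshold then (st.1 ++ [t], st.2)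
        else if t.1 - st.2.1 ≤ du_t ∧ t.2 ≥ threshold then st
        else if t.2 < threshold then (st.1, t)
        else st)
      (acc, r)).1 = acc ++ pvGo threshold du_t xs r.1 := by
  induction xs with
  | nil => intro acc r; simp [pvGo]
  | cons t ts ih =>
    intro acc r
    simp only [List.foldl_cons, pvGo]
    split_ifs
    all_goals try (exfalso; omega)
    all_goals (rw [ih]; try simp)

theorem pvB_go (threshold du_t : Int) (xs : List (Int × Int)) :
    ∀ (r : Int),
    ((xs.zip (pvAltRefs threshold xs r)).filter
      (fun p => decide (p.1.2 ≥ threshold) && decide (p.1.1 - p.2 > du_t))).map (·.1)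
      = pvGo threshold du_t xs r := by
  induction xs with
  | nil => intro r; simp [pvAltRefs, pvGo]
  | cons t ts ih =>
    intro r
    simp only [pvAltRefs, pvGo]
    by_cases hlt : t.2 < threshold
    · have h1 : ¬ (t.2 ≥ threshold) := by omega
      simp [hlt, h1, ih]
    · have h1 : t.2 ≥ threshold := by omega
      by_cases hd : t.1 - r > du_t
      · simp [hlt, h1, hd, ih]
      · simp [hlt, h1, hd, ih]

-- ===== VERDICT (by name: the statement is the Claim_ definition above) =====
theorem threshholdFilterWithDuration_spec : Claim_equal_threshholdFilterWithDuration := by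
  intro cpu threshold du_t _hdom hpre
  unfold Spec_threshholdFilterWithDuration threshholdFilterWithDuration threshholdFilterWithDuration_alt
  match cpu, hpre with
  | t :: ts, _ =>
    simp only [List.head?]
    rw [pvA_go, pvB_go]
    simp
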